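-- pv_equiv track=rewrite | github.com/loning/mbook-binary | src/binaryuniverse/tests/test_T24_1.py | remove_consecutive_ones
-- ===== SOURCE A (Python) =====
-- from typing import List, Dict, Tuple, Optional, Any
--
-- def remove_consecutive_ones(binary: List[int]) -> List[int]:
--     """
--     消除连续11模式
--     11 → 100 (基于Fibonacci递归: F_{n+1} = F_n + F_{n-1})
--     """
--     result = []
--     i = 0
--
--     while i < len(binary):
--         if i < len(binary) - 1 and binary[i] == 1 and binary[i+1] == 1:
--             # 11模式转换为100
--             result.extend([1, 0, 0])
--             i += 2
--         else:
--             result.append(binary[i])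
--             i += 1
--
--     return result
-- ===== SOURCE B (Python) =====
-- def remove_consecutive_ones(binary):
--     result = []
--     pending_one = False
--     for x in binary:
--         if pending_one and x == 1:
--             # the first 1 of the pair was already emitted; finish 11 -> 100
--             result.append(0)
--             result.append(0)
--             pending_one = False
--         else:
--             result.append(x)
--             pending_one = (x == 1)
--     return result
-- ===== Notes on version B (the rewrite author's own statement) =====
-- stated objective: simpler
-- what changed: Replaced the index-with-lookahead while-loop by a single forward for-each pass maintaining a pending_one flag (a two-state machine), with no indexing or length arithmetic.
import Mathlib
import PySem

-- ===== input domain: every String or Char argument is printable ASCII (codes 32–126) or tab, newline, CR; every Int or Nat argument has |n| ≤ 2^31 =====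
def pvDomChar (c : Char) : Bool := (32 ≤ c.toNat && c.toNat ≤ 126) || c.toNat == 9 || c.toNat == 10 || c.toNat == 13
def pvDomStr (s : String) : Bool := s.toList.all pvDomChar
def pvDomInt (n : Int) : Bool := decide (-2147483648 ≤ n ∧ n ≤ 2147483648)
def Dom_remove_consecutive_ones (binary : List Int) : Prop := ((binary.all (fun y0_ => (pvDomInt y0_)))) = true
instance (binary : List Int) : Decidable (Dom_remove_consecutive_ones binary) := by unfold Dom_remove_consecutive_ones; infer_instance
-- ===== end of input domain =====

-- B replaces A's index-with-lookahead while-loop by a single for-each pass with a pending-one flag (simpler).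

-- ===== PORT A =====
-- A's while-loop: index i, result accumulator; binary[i] with i < length is exact as getD.
def removeLoopA (binary result : List Int) (i : Nat) : List Int :=
  if i < binary.length then
    if i < binary.length - 1 ∧ binary.getD i 0 = 1 ∧ binary.getD (i+1) 0 = 1 then
      removeLoopA binary (result ++ [1, 0, 0]) (i + 2)
    else
      removeLoopA binary (result ++ [binary.getD i 0]) (i + 1)
  else result
termination_by binary.length - i
decreasing_by all_goals omega

def remove_consecutive_ones (binary : List Int) : List Int :=
  removeLoopA binary [] 0

-- ===== PORT B =====
def stepB (st : List Int × Bool) (x : Int) : List Int × Bool :=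
  if st.2 ∧ x = 1 then (st.1 ++ [0, 0], false) else (st.1 ++ [x], x == 1)

def remove_consecutive_ones_alt (binary : List Int) : List Int :=
  (binary.foldl stepB ([], false)).1

-- ===== PRECONDITION & SPEC =====
def Spec_remove_consecutive_ones (binary : List Int) (out : List Int) : Prop := out = remove_consecutive_ones_alt binary
instance (binary : List Int) (out : List Int) : Decidable (Spec_remove_consecutive_ones binary out) := by unfold Spec_remove_consecutive_ones; infer_instance

-- ===== CLAIM (what is proved, stated in full; the proofs are below) =====
def Claim_equal_remove_consecutive_ones : Prop := ∀ (binary : List Int), Dom_remove_consecutive_ones binary → Spec_remove_consecutive_ones binary (remove_consecutive_ones binary)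

-- ===== LEMMAS AND PROOFS =====

-- Common characterisation: greedy non-overlapping replacement of a leading 1,1 pair by 1,0,0.
def gSpec : List Int → List Int
  | [] => []
  | [x] => [x]
  | x :: y :: rest => if x = 1 ∧ y = 1 then 1 :: 0 :: 0 :: gSpec rest else x :: gSpec (y :: rest)

theorem removeLoopA_eq (binary : List Int) (result : List Int) (i : Nat) :
    removeLoopA binary result i = result ++ gSpec (binary.drop i) := by
  refine removeLoopA.induct binary
    (fun result i => removeLoopA binary result i = result ++ gSpec (binary.drop i))
    ?_ ?_ ?_ result i
  · intro result i h hc ih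
    obtain ⟨h1, h2, h3⟩ := hc
    rw [removeLoopA, if_pos h, if_pos ⟨h1, h2, h3⟩, ih]
    have hi : i < binary.length := h
    have hi1 : i + 1 < binary.length := by omega
    rw [List.drop_eq_getElem_cons hi, List.drop_eq_getElem_cons hi1]
    rw [List.getD_eq_getElem _ _ hi] at h2
    rw [List.getD_eq_getElem _ _ hi1] at h3
    simp [gSpec, h2, h3]
  · intro result i h hc ih
    rw [removeLoopA, if_pos h, if_neg hc, ih]
    have hi : i < binary.length := h
    rw [List.drop_eq_getElem_cons hi, List.getD_eq_getElem _ _ hi]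
    rcases he : binary.drop (i+1) with _ | ⟨y, rest⟩
    · simp [gSpec]
    · have hi1 : i + 1 < binary.length := by
        have := congrArg List.length he
        simp at this; omega
      have hy : y = binary[i+1] := by
        have := List.drop_eq_getElem_cons hi1 (l := binary)
        rw [he] at this
        exact (List.cons.injEq ..).mp this |>.1
      have hne : ¬ (binary[i] = 1 ∧ y = 1) := by
        intro ⟨ha, hb⟩
        exact hc ⟨by omega, by rw [List.getD_eq_getElem _ _ hi]; exact ha,
          by rw [List.getD_eq_getElem _ _ hi1]; rw [hy] at hb; exact hb⟩
      simp [gSpec, hne]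
  · intro result i h
    rw [removeLoopA, if_neg h]
    simp [List.drop_eq_nil_of_le (by omega : binary.length ≤ i), gSpec]

theorem stepB_of_ne (res : List Int) (x : Int) (hx : x ≠ 1) (p : Bool) :
    stepB (res, p) x = stepB (res, false) x := by
  simp [stepB, hx]

theorem foldB_eq (l : List Int) : ∀ res : List Int,
    (l.foldl stepB (res, false)).1 = res ++ gSpec l := by
  induction l using gSpec.induct with
  | case1 => simp [gSpec]
  | case2 x =>
    intro res
    simp [List.foldl, stepB, gSpec]
  | case3 x y rest hxy ih =>
    intro res
    obtain ⟨hx, hy⟩ := hxy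
    subst hx; subst hy
    simp only [List.foldl_cons]
    have s1 : stepB (res, false) 1 = (res ++ [1], true) := by simp [stepB]
    have s2 : stepB (res ++ [1], true) 1 = (res ++ [1] ++ [0, 0], false) := by simp [stepB]
    rw [s1, s2, ih]
    simp [gSpec]
  | case4 x y rest hxy ih =>
    intro res
    by_cases hx : x = 1
    · have hy : y ≠ 1 := fun h => hxy ⟨hx, h⟩
      subst hx
      simp only [List.foldl_cons]
      have s1 : stepB (res, false) 1 = (res ++ [1], true) := by simp [stepB]
      rw [s1, stepB_of_ne _ _ hy]
      have := ih (res ++ [1])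
      simp only [List.foldl_cons] at this
      rw [this]
      simp [gSpec, hy]
    · have s1 : stepB (res, false) x = (res ++ [x], false) := by
        simp [stepB, hx]
      simp only [List.foldl_cons]
      rw [s1]
      have := ih (res ++ [x])
      simp only [List.foldl_cons] at this
      rw [this]
      simp [gSpec, hx]

-- ===== VERDICT (by name: the statement is the Claim_ definition above) =====
theorem remove_consecutive_ones_spec : Claim_equal_remove_consecutive_ones := by
  intro binary _
  unfold Spec_remove_consecutive_ones remove_consecutive_ones remove_consecutive_ones_alt
  rw [removeLoopA_eq, foldB_eq]
  simp
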